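-- pv_equiv track=rewrite | github.com/EminaMerlakSusman/competitive-programming | 2021/padajoca_podzaporedja.py | how_many_length_k
-- ===== SOURCE A (Python) =====
-- def how_many_length_k(arr, n, k):
--     '''Counts the number of decreasing subsequences of length k in the array.
--     It does this by making a matrix of size k x n where the i-th
--     element in the row represents how many decreasing subsequences
--     of length j end at this element.
--     '''
--
--     # number of decr. sub. of each length up to k, that end at i-th element
--     count_at_each = [[0 for i in range(n)]
--           for i in range(k)]
--
--     for i in range(n):
--         count_at_each[0][i] = 1
--
--     for l in range(1, k):
--
--         # loop through subsequences ending at arr[i]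
--         for i in range(l, n):
--
--             # set count of subs. ending at arr[i] to 0
--             count_at_each[l][i] = 0
--
--             # loop through elements behind i in the list.
--             # if you find one that's bigger,
--             # then the number of decreasing subsequences
--             # of length l-1 ending at the bigger elt. is
--             # added to the number of decr.sub. at element arr[i]
--             for j in range(l - 1, i):
--                 if (arr[j] > arr[i]):
--                     count_at_each[l][i] += count_at_each[l - 1][j]
--
--     # count up the k-th row of the matrix
--     total = 0
--     for i in range(k - 1, n):
--         total += count_at_each[k - 1][i]
--
--     return total
-- ===== SOURCE B (Python) =====
-- def how_many_length_k(arr, n, k):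
--     '''Counts the number of decreasing subsequences of length k in the array.
--
--     Per DP layer, instead of scanning all earlier positions for each end
--     position, earlier elements are inserted into a sparse segment tree keyed
--     by VALUE, so the count of larger predecessors' subsequences is a single
--     range-sum query over the values strictly above arr[i].
--     '''
--     if n <= 0 or k <= 0:
--         return 0
--     if k == 1:
--         return n
--     if n == 1:
--         return 0
--
--     lo = min(arr[:n])
--     hi = max(arr[:n]) + 1
--
--     # persistent sparse segment tree over the value range [a, b):
--     # a node is (sum, left, right); None is an empty subtree
--     def update(t, a, b, key, w):
--         s, lch, rch = t if t is not None else (0, None, None)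
--         if b - a <= 1:
--             return (s + w, lch, rch)
--         m = a + (b - a) // 2
--         if key < m:
--             return (s + w, update(lch, a, m, key, w), rch)
--         else:
--             return (s + w, lch, update(rch, m, b, key, w))
--
--     # sum of weights stored at keys strictly greater than v
--     def qgt(t, a, b, v):
--         if t is None:
--             return 0
--         if v < a:
--             return t[0]
--         if b - 1 <= v:
--             return 0
--         m = a + (b - a) // 2
--         return qgt(t[1], a, m, v) + qgt(t[2], m, b, v)
--
--     prev = [1] * n
--     for _ in range(k - 1):
--         tree = None
--         new = []
--         for i in range(n):
--             new.append(qgt(tree, lo, hi, arr[i]))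
--             tree = update(tree, lo, hi, arr[i], prev[i])
--         prev = new
--     return sum(prev)
-- ===== Notes on version B (the rewrite author's own statement) =====
-- stated objective: alternative
-- what changed: Replaces A's k x n table with its quadratic inner scan over all earlier positions by a per-layer persistent sparse segment tree keyed by value: each position is answered by one range-sum query over strictly larger values and then inserted, and the trivial cases (k<=0, n<=0, k==1, n==1) are answered directly.
import Mathlib
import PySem

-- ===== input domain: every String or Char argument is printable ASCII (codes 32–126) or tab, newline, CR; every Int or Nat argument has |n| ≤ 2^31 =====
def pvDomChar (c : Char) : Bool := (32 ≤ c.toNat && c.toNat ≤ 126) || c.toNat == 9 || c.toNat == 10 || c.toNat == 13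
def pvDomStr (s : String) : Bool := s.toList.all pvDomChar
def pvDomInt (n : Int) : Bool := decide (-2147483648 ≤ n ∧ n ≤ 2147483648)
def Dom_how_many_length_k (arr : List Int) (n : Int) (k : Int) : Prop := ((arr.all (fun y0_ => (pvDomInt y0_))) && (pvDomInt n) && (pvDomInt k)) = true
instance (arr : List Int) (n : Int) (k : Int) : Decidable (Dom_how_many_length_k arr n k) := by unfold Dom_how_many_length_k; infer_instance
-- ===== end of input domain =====

-- B replaces A's inner scan of all earlier positions (per layer, per element) by a persistent
-- sparse segment tree keyed by value: each element does one range-sum query over strictly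
-- larger values and one point insertion ('alternative': different algorithm, same values).


-- ===== PORT A =====
-- arr[i]: Python raises IndexError out of range; on Pre_ inputs every read is a
-- nonnegative in-range index, so the getD default is never observed there.
def pyAt (arr : List Int) (i : Int) : Int := (PySem.List.pyGet? arr i).getD 0
-- count_at_each[l] (a row of the matrix); all indices used are ≥ 0, so .toNat is exact
def aRow (m : List (List Int)) (l : Int) : List Int := m.getD l.toNat []
-- count_at_each[l][i]
def aGet2 (m : List (List Int)) (l i : Int) : Int := (aRow m l).getD i.toNat 0
-- count_at_each[l][i] = v
def aSet2 (m : List (List Int)) (l i : Int) (v : Int) : List (List Int) :=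
  m.set l.toNat ((aRow m l).set i.toNat v)

def how_many_length_k (arr : List Int) (n : Int) (k : Int) : Int :=
  -- count_at_each = [[0 for i in range(n)] for i in range(k)]
  let mat0 : List (List Int) :=
    (PySem.List.pyRange 0 k 1).map (fun _ => (PySem.List.pyRange 0 n 1).map (fun _ => (0 : Int)))
  -- for i in range(n): count_at_each[0][i] = 1
  let mat1 := (PySem.List.pyRange 0 n 1).foldl (fun m i => aSet2 m 0 i 1) mat0
  -- for l in range(1, k): for i in range(l, n): …
  let mat2 := (PySem.List.pyRange 1 k 1).foldl (fun m l =>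
      (PySem.List.pyRange l n 1).foldl (fun m i =>
        -- count_at_each[l][i] = 0, then: for j in range(l-1, i): if arr[j] > arr[i]: …
        (PySem.List.pyRange (l - 1) i 1).foldl
          (fun m j => if pyAt arr j > pyAt arr i
                      then aSet2 m l i (aGet2 m l i + aGet2 m (l - 1) j) else m)
          (aSet2 m l i 0)) m) mat1
  -- total = 0; for i in range(k-1, n): total += count_at_each[k-1][i]
  (PySem.List.pyRange (k - 1) n 1).foldl (fun t i => t + aGet2 mat2 (k - 1) i) 0

-- ===== PORT B =====
-- persistent sparse segment tree over a value range [a, b): a Python node is the tuple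
-- (sum, left, right), None is the empty subtree
inductive STree where
  | nil : STree
  | node : Int → STree → STree → STree
deriving DecidableEq, Repr

-- 's, lch, rch = t if t is not None else (0, None, None)': the three tuple components
def stSum : STree → Int
  | .nil => 0
  | .node s _ _ => s
def stLeft : STree → STree
  | .nil => .nil
  | .node _ l _ => l
def stRight : STree → STree
  | .nil => .nil
  | .node _ _ r => r

-- Source B's update; '(b - a) // 2' has a positive dividend here, so Python floor
-- division coincides with Lean's '/' on Int.  The extra fuel argument only makes the
-- recursion structural (Python's recursion terminates on its own); the caller passes
-- (b - a).toNat, which always suffices since the interval width at least halves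
def stUpdate : Nat → STree → Int → Int → Int → Int → STree
  | 0, t, _, _, _, _ => t
  | fuel + 1, t, a, b, key, w =>
    if b - a ≤ 1 then .node (stSum t + w) (stLeft t) (stRight t)
    else if key < a + (b - a) / 2 then
      .node (stSum t + w) (stUpdate fuel (stLeft t) a (a + (b - a) / 2) key w) (stRight t)
    else
      .node (stSum t + w) (stLeft t) (stUpdate fuel (stRight t) (a + (b - a) / 2) b key w)

-- Source B's qgt: sum of weights stored at keys strictly greater than v
def stQgt : STree → Int → Int → Int → Int
  | .nil, _, _, _ => 0
  | .node s l r, a, b, v =>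
    if v < a then s
    else if b - 1 ≤ v then 0
    else stQgt l a (a + (b - a) / 2) v + stQgt r (a + (b - a) / 2) b v

def how_many_length_k_alt (arr : List Int) (n : Int) (k : Int) : Int :=
  if n ≤ 0 ∨ k ≤ 0 then 0
  else if k = 1 then n
  else if n = 1 then 0
  else
    -- lo = min(arr[:n]); hi = max(arr[:n]) + 1 — the slice is nonempty on Pre_
    -- (2 ≤ n ≤ len(arr)), so the .getD 0 default of min?/max? is never observed there
    let lo := (PySem.List.min? (PySem.List.slice arr none (some n)) (fun x => x)).getD 0
    let hi := (PySem.List.max? (PySem.List.slice arr none (some n)) (fun x => x)).getD 0 + 1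
    -- prev = [1]*n; for _ in range(k-1): … ; prev[i] is in range, so .getD 0 is unobserved
    ((List.range (k - 1).toNat).foldl
      (fun (prev : List Int) _ =>
        ((List.range n.toNat).foldl
          (fun (st : STree × List Int) (i : Nat) =>
            (stUpdate ((hi - lo).toNat) st.1 lo hi (pyAt arr (i : Int)) ((PySem.List.pyGet? prev (i : Int)).getD 0),
             st.2 ++ [stQgt st.1 lo hi (pyAt arr (i : Int))]))
          (STree.nil, [])).2)
      (List.replicate n.toNat 1)).sum

-- ===== PRECONDITION & SPEC =====
-- Exactly the inputs on which the Python A returns: everywhere else A raises IndexError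
-- (k ≤ 0 with a nonempty final loop, i.e. k - 1 < n; or k ≥ 2 ∧ n ≥ 2 ∧ n > len(arr)).
def Pre_how_many_length_k (arr : List Int) (n : Int) (k : Int) : Prop :=
  (k ≤ 0 ∧ n ≤ k - 1) ∨ (1 ≤ k ∧ (k = 1 ∨ n ≤ 1 ∨ n ≤ (arr.length : Int)))
instance (arr : List Int) (n : Int) (k : Int) : Decidable (Pre_how_many_length_k arr n k) := by
  unfold Pre_how_many_length_k; infer_instance

def pvWitness_how_many_length_k : List Int × Int × Int := ([3, 1, 2, 1, 0], 5, 3)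

def Spec_how_many_length_k (arr : List Int) (n : Int) (k : Int) (out : Int) : Prop := out = how_many_length_k_alt arr n k
instance (arr : List Int) (n : Int) (k : Int) (out : Int) : Decidable (Spec_how_many_length_k arr n k out) := by unfold Spec_how_many_length_k; infer_instance

-- ===== CLAIM (what is proved, stated in full; the proofs are below) =====
def Claim_equal_how_many_length_k : Prop := ∀ (arr : List Int) (n : Int) (k : Int), Dom_how_many_length_k arr n k → Pre_how_many_length_k arr n k → Spec_how_many_length_k arr n k (how_many_length_k arr n k)

-- ===== LEMMAS AND PROOFS =====

-- ---------- A-side: the k×n matrix as a function of (row, column) ----------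
def mkMat (K N : Nat) (f : Nat → Nat → Int) : List (List Int) :=
  (List.range K).map (fun r => (List.range N).map (f r))

theorem mkMat_congr {K N : Nat} {f g : Nat → Nat → Int}
    (h : ∀ r, r < K → ∀ c, c < N → f r c = g r c) : mkMat K N f = mkMat K N g := by
  unfold mkMat
  refine List.map_congr_left (fun r hr => ?_)
  refine List.map_congr_left (fun c hc => ?_)
  exact h r (List.mem_range.mp hr) c (List.mem_range.mp hc)

theorem aRow_mkMat {K N : Nat} {f : Nat → Nat → Int} {l : Int}
    (hl : l.toNat < K) : aRow (mkMat K N f) l = (List.range N).map (f l.toNat) := by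
  unfold aRow mkMat
  rw [List.getD_eq_getElem _ _ (by simpa using hl)]
  simp

theorem aGet2_mkMat {K N : Nat} {f : Nat → Nat → Int} {l i : Int}
    (hl : l.toNat < K) (hi : i.toNat < N) :
    aGet2 (mkMat K N f) l i = f l.toNat i.toNat := by
  unfold aGet2
  rw [aRow_mkMat hl, List.getD_eq_getElem _ _ (by simpa using hi)]
  simp

theorem aSet2_mkMat {K N : Nat} {f : Nat → Nat → Int} {l i : Int} (v : Int)
    (hl : l.toNat < K) (_hi : i.toNat < N) :
    aSet2 (mkMat K N f) l i v
      = mkMat K N (fun a b => if a = l.toNat ∧ b = i.toNat then v else f a b) := by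
  unfold aSet2
  rw [aRow_mkMat hl]
  unfold mkMat
  apply List.ext_getElem
  · simp
  · intro r h1 h2
    simp only [List.getElem_set, List.getElem_map, List.getElem_range]
    by_cases hr : l.toNat = r
    · subst hr
      rw [if_pos rfl]
      apply List.ext_getElem
      · simp
      · intro c hc1 hc2
        simp only [List.getElem_set, List.getElem_map, List.getElem_range]
        by_cases hc : i.toNat = c
        · subst hc; simp
        · simp [hc, Ne.symm hc]
    · rw [if_neg hr]
      refine List.map_congr_left (fun c _ => ?_)
      simp [Ne.symm hr]

-- ends(i, l) of A's docstring, as a recursive specification: the number of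
-- decreasing subsequences of length l ending at index i (proof-side only)
def altEnds (arr : List Int) : Nat → Nat → Int
  | 0, _ => 1
  | 1, _ => 1
  | l + 2, i =>
      ((List.range i).map (fun (j : Nat) =>
        if pyAt arr (j : Int) > pyAt arr (i : Int) then altEnds arr (l + 1) j else 0)).sum

-- altEnds arr (l+1) i = 0 whenever fewer than l elements precede position i
theorem altEnds_zero (arr : List Int) :
    ∀ l i : Nat, i < l → altEnds arr (l + 1) i = 0 := by
  intro l
  induction l with
  | zero => intro i hi; omega
  | succ m ih =>
      intro i hi
      show altEnds arr (m + 2) i = 0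
      rw [altEnds]
      apply List.sum_eq_zero
      intro x hx
      rcases List.mem_map.mp hx with ⟨j, hj, rfl⟩
      have hjm : j < m := by
        have := List.mem_range.mp hj; omega
      rw [ih j hjm]
      split <;> rfl

-- the row-0 initialisation loop
theorem init_fold {K N : Nat} (hK : 1 ≤ K) :
    ∀ (m : Nat), m ≤ N → ∀ f : Nat → Nat → Int,
      (PySem.List.pyRange 0 (m : Int) 1).foldl (fun M i => aSet2 M 0 i 1) (mkMat K N f)
        = mkMat K N (fun r c => if r = 0 ∧ c < m then 1 else f r c) := by
  intro m
  induction m with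
  | zero =>
      intro _ f
      rw [PySem.List.pyRange_one_eq_nil (by omega)]
      simp only [List.foldl_nil]
      exact mkMat_congr (by intro r _ c _; simp)
  | succ m ih =>
      intro hm f
      have h1 : ((m + 1 : Nat) : Int) = (m : Int) + 1 := by push_cast; ring
      rw [h1, PySem.List.pyRange_one_succ_right (by omega), List.foldl_append,
          ih (by omega) f]
      simp only [List.foldl_cons, List.foldl_nil]
      rw [aSet2_mkMat 1 (by simpa using hK) (by simpa using Nat.lt_of_succ_le hm)]
      refine mkMat_congr (fun r _ c _ => ?_)
      simp only [Int.toNat_zero, Int.toNat_natCast]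
      split_ifs <;> first | rfl | omega

-- the innermost j-loop: accumulate into entry (l, i), reading row l-1
theorem jfold_mkMat {K N : Nat} (arr : List Int) (l i : Nat)
    (hl1 : 1 ≤ l) (hlK : l < K) (hiN : i < N) :
    ∀ (js : List Int) (f : Nat → Nat → Int),
      (∀ j ∈ js, 0 ≤ j ∧ j.toNat < N) →
      js.foldl
        (fun m j => if pyAt arr j > pyAt arr (i : Int)
                    then aSet2 m (l : Int) (i : Int)
                          (aGet2 m (l : Int) (i : Int) + aGet2 m ((l : Int) - 1) j)
                    else m)
        (mkMat K N f)
      = mkMat K N (fun a b => if a = l ∧ b = i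
          then f l i + (js.map (fun j => if pyAt arr j > pyAt arr (i : Int)
                                          then f (l - 1) j.toNat else 0)).sum
          else f a b) := by
  intro js
  induction js with
  | nil =>
      intro f _
      simp only [List.foldl_nil, List.map_nil, List.sum_nil, add_zero]
      refine mkMat_congr (fun r _ c _ => ?_)
      split_ifs with h
      · rw [h.1, h.2]
      · rfl
  | cons j js ih =>
      intro f hjs
      obtain ⟨hj0, hjN⟩ := hjs j (by simp)
      have hcast : ((l : Int) - 1) = ((l - 1 : Nat) : Int) := by omega
      simp only [List.foldl_cons]
      by_cases hc : pyAt arr j > pyAt arr (i : Int)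
      · rw [if_pos hc]
        have hgll : aGet2 (mkMat K N f) ((l : Int)) ((i : Int)) = f l i := by
          rw [aGet2_mkMat (by simpa using hlK) (by simpa using hiN)]; simp
        have hgl1 : aGet2 (mkMat K N f) ((l : Int) - 1) j = f (l - 1) j.toNat := by
          rw [hcast, aGet2_mkMat (by simpa using Nat.lt_of_le_of_lt (Nat.sub_le l 1) hlK)
                (by simpa using hjN)]
          simp
        rw [hgll, hgl1,
            aSet2_mkMat _ (by simpa using hlK) (by simpa using hiN)]
        rw [ih _ (fun x hx => hjs x (List.mem_cons_of_mem _ hx))]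
        refine mkMat_congr (fun r hr c hcN => ?_)
        simp only [Int.toNat_natCast]
        by_cases hb : r = l ∧ c = i
        · rw [if_pos hb, if_pos hb, if_pos (show True ∧ True from ⟨trivial, trivial⟩)]
          simp only [List.map_cons, List.sum_cons, if_pos hc]
          rw [add_assoc]
          congr 2
          refine congrArg List.sum (List.map_congr_left (fun x _ => ?_))
          have hne : ¬ (l - 1 = l ∧ x.toNat = i) := by omega
          by_cases hcx : pyAt arr x > pyAt arr (i : Int)
          · rw [if_pos hcx, if_pos hcx, if_neg hne]
          · rw [if_neg hcx, if_neg hcx]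
        · rw [if_neg hb, if_neg hb, if_neg hb]
      · rw [if_neg hc, ih _ (fun x hx => hjs x (List.mem_cons_of_mem _ hx))]
        refine mkMat_congr (fun r _ c _ => ?_)
        simp only [List.map_cons, List.sum_cons, if_neg hc, zero_add]

-- the middle i-loop for one layer l: fill row l from row l-1
theorem ifold_mkMat {K N : Nat} (arr : List Int) (l : Nat)
    (hl1 : 1 ≤ l) (hlK : l < K) (f : Nat → Nat → Int) :
    ∀ (m : Nat), l ≤ m → m ≤ N →
      (PySem.List.pyRange (l : Int) (m : Int) 1).foldl
        (fun m0 i =>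
          (PySem.List.pyRange ((l : Int) - 1) i 1).foldl
            (fun mm j => if pyAt arr j > pyAt arr i
                         then aSet2 mm (l : Int) i (aGet2 mm (l : Int) i + aGet2 mm ((l : Int) - 1) j)
                         else mm)
            (aSet2 m0 (l : Int) i 0))
        (mkMat K N f)
      = mkMat K N (fun a b => if a = l ∧ l ≤ b ∧ b < m
          then ((PySem.List.pyRange ((l : Int) - 1) (b : Int) 1).map
                 (fun j => if pyAt arr j > pyAt arr (b : Int) then f (l - 1) j.toNat else 0)).sum
          else f a b) := by
  intro m hlm
  induction m, hlm using Nat.le_induction with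
  | base =>
      intro _
      rw [PySem.List.pyRange_one_eq_nil (by omega)]
      simp only [List.foldl_nil]
      refine mkMat_congr (fun r _ c _ => ?_)
      split_ifs <;> omega
  | succ m hlm ih =>
      intro hmN
      have hmN' : m < N := by omega
      have h1 : ((m + 1 : Nat) : Int) = (m : Int) + 1 := by push_cast; ring
      rw [h1, PySem.List.pyRange_one_succ_right (by exact_mod_cast hlm), List.foldl_append,
          ih (by omega)]
      simp only [List.foldl_cons, List.foldl_nil]
      rw [aSet2_mkMat 0 (by simpa using hlK) (by simpa using hmN')]
      simp only [Int.toNat_natCast]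
      rw [jfold_mkMat arr l m hl1 hlK hmN' _ _
          (by
            intro j hj
            have hj' := PySem.List.mem_pyRange_one.mp hj
            constructor
            · omega
            · omega)]
      refine mkMat_congr (fun r hr c hcN => ?_)
      by_cases hb : r = l ∧ c = m
      · obtain ⟨hbr, hbc⟩ := hb
        rw [if_pos (show r = l ∧ l ≤ c ∧ c < m + 1 by omega), hbc,
            if_pos (show r = l ∧ m = m from ⟨hbr, rfl⟩),
            if_pos (show l = l ∧ m = m from ⟨rfl, rfl⟩), zero_add]
        refine congrArg List.sum (List.map_congr_left (fun x _ => ?_))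
        split_ifs <;> first | rfl | omega
      · rw [if_neg hb]
        split_ifs <;> first | rfl | omega

-- number of decreasing subsequences of length r+1 ending at position c
def Erow (arr : List Int) (r c : Nat) : Int := altEnds arr (r + 1) c

-- a sum over range(a, b) of a function vanishing below a is the sum over range(b)
theorem sum_pyRange_drop (h : Nat → Int) (a b : Nat) (hab : a ≤ b)
    (h0 : ∀ j, j < a → h j = 0) :
    ((PySem.List.pyRange (a : Int) (b : Int) 1).map (fun j => h j.toNat)).sum
      = ((List.range b).map h).sum := by
  have hsplit := PySem.List.pyRange_one_append 0 (a : Int) (b : Int)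
      (by omega) (by exact_mod_cast hab)
  have hb0 : PySem.List.pyRange 0 (b : Int) 1 = (List.range b).map (fun t : Nat => (t : Int)) := by
    rw [PySem.List.pyRange_one]
    simp
  have hkey := congrArg (fun L => (L.map (fun j : Int => h j.toNat)).sum) hsplit
  simp only [List.map_append, List.sum_append] at hkey
  rw [hb0] at hkey
  have hlow : (((PySem.List.pyRange 0 (a : Int) 1).map (fun j : Int => h j.toNat))).sum = 0 := by
    apply List.sum_eq_zero
    intro x hx
    rcases List.mem_map.mp hx with ⟨j, hj, rfl⟩
    have := PySem.List.mem_pyRange_one.mp hj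
    exact h0 j.toNat (by omega)
  rw [hlow, zero_add] at hkey
  rw [← hkey]
  simp [List.map_map, Function.comp_def]

-- the outer layer loop: after layers 1..L-1 every row r < L holds Erow arr r
theorem lfold_mkMat {K N : Nat} (arr : List Int) :
    ∀ (L : Nat), 1 ≤ L → L ≤ K →
      (PySem.List.pyRange 1 (L : Int) 1).foldl
        (fun m l =>
          (PySem.List.pyRange l (N : Int) 1).foldl (fun m0 i =>
            (PySem.List.pyRange (l - 1) i 1).foldl
              (fun mm j => if pyAt arr j > pyAt arr i
                           then aSet2 mm l i (aGet2 mm l i + aGet2 mm (l - 1) j)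
                           else mm)
              (aSet2 m0 l i 0)) m)
        (mkMat K N (fun r _ => if r = 0 then 1 else 0))
      = mkMat K N (fun r c => if r < L then Erow arr r c else 0) := by
  intro L hL1
  induction L, hL1 using Nat.le_induction with
  | base =>
      intro _
      rw [PySem.List.pyRange_one_eq_nil (by omega)]
      simp only [List.foldl_nil]
      refine mkMat_congr (fun r _ c _ => ?_)
      by_cases h0 : r = 0
      · subst h0
        rw [if_pos rfl, if_pos (by omega)]
        rfl
      · rw [if_neg h0, if_neg (by omega)]
  | succ L hL1 ih =>
      intro hLK
      have hLK' : L < K := by omega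
      have h1 : ((L + 1 : Nat) : Int) = (L : Int) + 1 := by push_cast; ring
      rw [h1, PySem.List.pyRange_one_succ_right (by exact_mod_cast hL1), List.foldl_append,
          ih (by omega)]
      simp only [List.foldl_cons, List.foldl_nil]
      by_cases hLN : L ≤ N
      · rw [ifold_mkMat arr L hL1 hLK' _ N hLN le_rfl]
        refine mkMat_congr (fun r hr c hcN => ?_)
        by_cases hb : r = L ∧ L ≤ c ∧ c < N
        · rw [if_pos hb, if_pos (by omega)]
          obtain ⟨hbr, hbc1, _⟩ := hb
          have hcastL : ((L : Int) - 1) = ((L - 1 : Nat) : Int) := by omega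
          rw [hcastL]
          have hbody : ∀ x : Int, x ∈ PySem.List.pyRange ((L - 1 : Nat) : Int) (c : Int) 1 →
              (if pyAt arr x > pyAt arr (c : Int)
                then (if L - 1 < L then Erow arr (L - 1) x.toNat else 0) else 0)
              = (fun t : Nat => if pyAt arr (t : Int) > pyAt arr (c : Int)
                  then Erow arr (L - 1) t else 0) x.toNat := by
            intro x hx
            have hx' := PySem.List.mem_pyRange_one.mp hx
            have hxv : ((x.toNat : Nat) : Int) = x := by omega
            simp only [hxv]
            rw [if_pos (show L - 1 < L by omega)]
          have hdrop := sum_pyRange_drop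
              (fun t : Nat => if pyAt arr (t : Int) > pyAt arr (c : Int)
                then Erow arr (L - 1) t else 0) (L - 1) c (by omega)
              (fun j hj => by
                have hz : Erow arr (L - 1) j = 0 := altEnds_zero arr (L - 1) j hj
                show (if pyAt arr (j : Int) > pyAt arr (c : Int)
                  then Erow arr (L - 1) j else 0) = 0
                rw [hz]; split <;> rfl)
          rw [List.map_congr_left hbody, hdrop]
          show _ = Erow arr r c
          rw [hbr]
          simp only [Erow]
          rw [show L + 1 = (L - 1) + 2 by omega, altEnds]
        · rw [if_neg hb]
          split_ifs with h2 h3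
          · rfl
          · exfalso; omega
          · have hrL : r = L := by omega
            have hcL : c < L := by omega
            rw [hrL]
            exact (altEnds_zero arr L c hcL).symm
          · rfl
      · rw [PySem.List.pyRange_one_eq_nil (by omega)]
        simp only [List.foldl_nil]
        refine mkMat_congr (fun r hr c hcN => ?_)
        split_ifs with h2 h3
        · rfl
        · exfalso; omega
        · have hrL : r = L := by omega
          have hcL : c < L := by omega
          rw [hrL]
          exact (altEnds_zero arr L c hcL).symm
        · rfl

-- A's return is 0 outright when the final loop range(k-1, n) is empty and B's guard fires
theorem degenerate_case (arr : List Int) (n k : Int) (hnk : n ≤ k - 1) (hz : n ≤ 0 ∨ k ≤ 0) :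
    how_many_length_k arr n k = how_many_length_k_alt arr n k := by
  simp only [how_many_length_k_alt, if_pos hz, how_many_length_k]
  rw [PySem.List.pyRange_one_eq_nil hnk]
  simp

-- A's side summed up: the final loop total is the sum of Erow (K-1) over range N
theorem main_A (arr : List Int) (K N : Nat) (hK : 1 ≤ K) (_hN : 1 ≤ N) :
    how_many_length_k arr (N : Int) (K : Int)
      = ((List.range N).map (fun t => Erow arr (K - 1) t)).sum := by
  have hmat0 : (PySem.List.pyRange 0 (K : Int) 1).map
      (fun _ => (PySem.List.pyRange 0 (N : Int) 1).map (fun _ => (0 : Int)))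
      = mkMat K N (fun _ _ => 0) := by
    rw [PySem.List.pyRange_one, PySem.List.pyRange_one]
    simp [mkMat, List.map_map, Function.comp_def]
  simp only [how_many_length_k]
  rw [hmat0, init_fold hK N le_rfl]
  have hb01 : mkMat K N (fun r c => if r = 0 ∧ c < N then (1 : Int) else 0)
      = mkMat K N (fun r _ => if r = 0 then 1 else 0) := by
    refine mkMat_congr (fun r _ c hc => ?_)
    by_cases h : r = 0
    · rw [if_pos ⟨h, hc⟩, if_pos h]
    · rw [if_neg (by omega), if_neg h]
  rw [hb01, lfold_mkMat arr K hK le_rfl]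
  have hcK : ((K : Int) - 1) = ((K - 1 : Nat) : Int) := by omega
  rw [hcK, PySem.List.foldl_add, zero_add]
  have hbody : ∀ x ∈ PySem.List.pyRange ((K - 1 : Nat) : Int) (N : Int) 1,
      aGet2 (mkMat K N (fun r c => if r < K then Erow arr r c else 0)) ((K - 1 : Nat) : Int) x
        = (fun t : Nat => Erow arr (K - 1) t) x.toNat := by
    intro x hx
    have hx' := PySem.List.mem_pyRange_one.mp hx
    rw [aGet2_mkMat (by simpa using show K - 1 < K by omega) (by simpa using show x.toNat < N by omega)]
    simp only [Int.toNat_natCast]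
    rw [if_pos (show K - 1 < K by omega)]
  rw [List.map_congr_left hbody]
  by_cases hKN : K - 1 ≤ N
  · exact sum_pyRange_drop (fun t : Nat => Erow arr (K - 1) t) (K - 1) N hKN
      (fun j hj => altEnds_zero arr (K - 1) j hj)
  · rw [PySem.List.pyRange_one_eq_nil (by omega)]
    simp only [List.map_nil, List.sum_nil]
    symm
    apply List.sum_eq_zero
    intro x hx
    rcases List.mem_map.mp hx with ⟨t, ht, rfl⟩
    have htK : t < K - 1 := by have := List.mem_range.mp ht; omega
    exact altEnds_zero arr (K - 1) t htK

-- ---------- B-side: segment-tree correctness ----------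
theorem stQgt_nil (a b v : Int) : stQgt STree.nil a b v = 0 := rfl

theorem stQgt_node (s : Int) (l r : STree) (a b v : Int) :
    stQgt (STree.node s l r) a b v =
      if v < a then s
      else if b - 1 ≤ v then 0
      else stQgt l a (a + (b - a) / 2) v + stQgt r (a + (b - a) / 2) b v := rfl

-- inserting one key shifts every query by the key's weight iff the key is greater
theorem stQgt_update : ∀ (fuel : Nat) (a b key w v : Int) (t : STree), a ≤ key → key < b →
    (b - a).toNat ≤ fuel →
    stQgt (stUpdate fuel t a b key w) a b v = stQgt t a b v + (if v < key then w else 0) := by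
  intro fuel
  induction fuel with
  | zero =>
      intro a b key w v t h1 h2 hf
      exfalso; omega
  | succ fuel ih =>
      intro a b key w v t h1 h2 hf
      simp only [stUpdate]
      by_cases hleaf : b - a ≤ 1
      · rw [if_pos hleaf]
        rcases t with _ | ⟨s, l, r⟩ <;>
          simp only [stSum, stLeft, stRight, stQgt_nil, stQgt_node] <;>
          split_ifs <;> first | rfl | ring1 | omega | (exfalso; omega)
      · rw [if_neg hleaf]
        by_cases hk : key < a + (b - a) / 2
        · rw [if_pos hk]
          rcases t with _ | ⟨s, l, r⟩ <;>
            simp only [stSum, stLeft, stRight, stQgt_nil, stQgt_node] <;>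
            split_ifs <;>
            first
              | rfl
              | ring1
              | omega
              | (exfalso; omega)
              | (rw [ih a (a + (b - a) / 2) key w v _ h1 hk (by omega)]
                 try simp only [stQgt_nil]
                 split_ifs <;> first | ring1 | omega | (exfalso; omega))
        · rw [if_neg hk]
          rcases t with _ | ⟨s, l, r⟩ <;>
            simp only [stSum, stLeft, stRight, stQgt_nil, stQgt_node] <;>
            split_ifs <;>
            first
              | rfl
              | ring1
              | omega
              | (exfalso; omega)
              | (rw [ih (a + (b - a) / 2) b key w v _ (by omega) h2 (by omega)]
                 try simp only [stQgt_nil]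
                 split_ifs <;> first | ring1 | omega | (exfalso; omega))

-- a fold of insertions: the query returns the weighted count of strictly larger keys
theorem stQgt_foldl (a b v : Int) (ps : List (Int × Int)) :
    ∀ t : STree, (∀ p ∈ ps, a ≤ p.1 ∧ p.1 < b) →
      stQgt (ps.foldl (fun t p => stUpdate ((b - a).toNat) t a b p.1 p.2) t) a b v
        = stQgt t a b v + (ps.map (fun p => if v < p.1 then p.2 else 0)).sum := by
  induction ps with
  | nil => intro t _; simp
  | cons p ps ih =>
      intro t hb
      simp only [List.foldl_cons, List.map_cons, List.sum_cons]
      rw [ih _ (fun q hq => hb q (List.mem_cons_of_mem _ hq)),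
          stQgt_update ((b - a).toNat) a b p.1 p.2 v t (hb p (by simp)).1 (hb p (by simp)).2
            le_rfl]
      ring

-- prev[i] for prev = [f 0, …, f (n-1)] and i < n
theorem getD_pyGet?_map_range (f : Nat → Int) (n i : Nat) (h : i < n) :
    (PySem.List.pyGet? ((List.range n).map f) ((i : Nat) : Int)).getD 0 = f i := by
  rw [PySem.List.pyGet?_natCast]
  simp [h]

-- the keys-with-weights inserted by B's inner loop after m elements
def bPairs (arr : List Int) (prevf : Nat → Int) (m : Nat) : List (Int × Int) :=
  (List.range m).map (fun (j : Nat) => (pyAt arr (j : Int), prevf j))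

-- B's inner loop: the tree holds the first m (value, weight) pairs and the output list is
-- exactly A's recurrence sums
theorem inner_fold (arr : List Int) (a b : Int) (n : Nat) (prevf : Nat → Int)
    (hb : ∀ i : Nat, i < n → a ≤ pyAt arr (i : Int) ∧ pyAt arr (i : Int) < b) :
    ∀ m : Nat, m ≤ n →
      (List.range m).foldl
        (fun (st : STree × List Int) (i : Nat) =>
          (stUpdate ((b - a).toNat) st.1 a b (pyAt arr (i : Int)) ((PySem.List.pyGet? ((List.range n).map prevf) (i : Int)).getD 0),
           st.2 ++ [stQgt st.1 a b (pyAt arr (i : Int))]))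
        (STree.nil, [])
      = ((bPairs arr prevf m).foldl (fun t p => stUpdate ((b - a).toNat) t a b p.1 p.2) STree.nil,
         (List.range m).map (fun (i : Nat) =>
           ((List.range i).map (fun (j : Nat) =>
             if pyAt arr (j : Int) > pyAt arr (i : Int) then prevf j else 0)).sum)) := by
  intro m
  induction m with
  | zero => simp [bPairs]
  | succ m ih =>
      intro hm
      have hkeys : ∀ p ∈ bPairs arr prevf m, a ≤ p.1 ∧ p.1 < b := by
        intro p hp
        rcases List.mem_map.mp hp with ⟨j, hj, rfl⟩
        exact hb j (by have := List.mem_range.mp hj; omega)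
      rw [List.range_succ, List.foldl_append, ih (by omega)]
      simp only [List.foldl_cons, List.foldl_nil]
      rw [Prod.mk.injEq]
      refine ⟨?_, ?_⟩
      · rw [getD_pyGet?_map_range prevf n m (by omega)]
        simp only [bPairs, List.range_succ, List.map_append, List.foldl_append,
          List.map_cons, List.map_nil, List.foldl_cons, List.foldl_nil]
      · rw [stQgt_foldl a b (pyAt arr (m : Int)) (bPairs arr prevf m) STree.nil hkeys,
            stQgt_nil, zero_add, List.map_append]
        congr 1
        simp only [List.map_cons, List.map_nil]
        congr 1
        simp only [bPairs, List.map_map]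
        refine congrArg List.sum (List.map_congr_left (fun j _ => ?_))
        simp [gt_iff_lt, Function.comp]

-- B's layer loop: after T layers prev holds the counts of decreasing subsequences
-- of length T+1 ending at each position
theorem layer_fold (arr : List Int) (a b : Int) (n : Nat)
    (hb : ∀ i : Nat, i < n → a ≤ pyAt arr (i : Int) ∧ pyAt arr (i : Int) < b) (T : Nat) :
    (List.range T).foldl
      (fun (prev : List Int) _ =>
        ((List.range n).foldl
          (fun (st : STree × List Int) (i : Nat) =>
            (stUpdate ((b - a).toNat) st.1 a b (pyAt arr (i : Int)) ((PySem.List.pyGet? prev (i : Int)).getD 0),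
             st.2 ++ [stQgt st.1 a b (pyAt arr (i : Int))]))
          (STree.nil, [])).2)
      (List.replicate n 1)
    = (List.range n).map (fun i => altEnds arr (T + 1) i) := by
  induction T with
  | zero =>
      have h1 : (fun i : Nat => altEnds arr (0 + 1) i) = (fun _ : Nat => (1 : Int)) := rfl
      rw [List.range_zero, List.foldl_nil, h1, List.map_const', List.length_range]
  | succ T ih =>
      rw [List.range_succ, List.foldl_append, ih]
      simp only [List.foldl_cons, List.foldl_nil]
      rw [inner_fold arr a b n (fun i => altEnds arr (T + 1) i) hb n le_rfl]
      refine List.map_congr_left (fun i _ => ?_)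
      show _ = altEnds arr (T + 1 + 1) i
      rw [show T + 1 + 1 = T + 2 from rfl, altEnds]

-- B's side summed up, on the non-trivial inputs (2 ≤ n ≤ len(arr), 2 ≤ k)
theorem main_B (arr : List Int) (K N : Nat) (hK : 2 ≤ K) (hN : 2 ≤ N)
    (hlen : N ≤ arr.length) :
    how_many_length_k_alt arr (N : Int) (K : Int)
      = ((List.range N).map (fun t => Erow arr (K - 1) t)).sum := by
  have hxs : PySem.List.slice arr none (some (N : Int)) = arr.take N :=
    PySem.List.slice_to_natCast arr N
  have hne : arr.take N ≠ [] := by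
    intro h
    have hl := congrArg List.length h
    rw [List.length_take, List.length_nil] at hl
    omega
  obtain ⟨mn, hmn⟩ : ∃ m, PySem.List.min? (arr.take N) (fun x => x) = some m := by
    rcases h : PySem.List.min? (arr.take N) (fun x => x) with _ | m
    · exact absurd ((PySem.List.min?_eq_none_iff _ _).mp h) hne
    · exact ⟨m, rfl⟩
  obtain ⟨mx, hmx⟩ : ∃ m, PySem.List.max? (arr.take N) (fun x => x) = some m := by
    rcases h : PySem.List.max? (arr.take N) (fun x => x) with _ | m
    · exact absurd ((PySem.List.max?_eq_none_iff _ _).mp h) hne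
    · exact ⟨m, rfl⟩
  have hmem : ∀ i : Nat, i < N → pyAt arr (i : Int) ∈ arr.take N := by
    intro i hi
    have hil : i < arr.length := by omega
    have hval : pyAt arr (i : Int) = arr[i] := by
      simp [pyAt, PySem.List.pyGet?_natCast, hil]
    rw [hval]
    have : i < (arr.take N).length := by simp; omega
    have hg : (arr.take N)[i] = arr[i] := List.getElem_take
    exact hg ▸ List.getElem_mem this
  have hbnd : ∀ i : Nat, i < N → mn ≤ pyAt arr (i : Int) ∧ pyAt arr (i : Int) < mx + 1 := by
    intro i hi
    refine ⟨PySem.List.min?_isMin hmn _ (hmem i hi), ?_⟩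
    have := PySem.List.max?_isMax hmx _ (hmem i hi)
    omega
  simp only [how_many_length_k_alt]
  rw [if_neg (by omega), if_neg (by exact_mod_cast (by omega : ¬ (K : Int) = 1)),
      if_neg (by exact_mod_cast (by omega : ¬ (N : Int) = 1))]
  simp only [hxs, hmn, hmx, Option.getD_some]
  rw [show ((K : Int) - 1).toNat = K - 1 by omega, show ((N : Int)).toNat = N by simp,
      layer_fold arr mn (mx + 1) N hbnd (K - 1)]
  refine congrArg List.sum (List.map_congr_left (fun t _ => ?_))
  show altEnds arr (K - 1 + 1) t = Erow arr (K - 1) t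
  rfl

-- ===== VERDICT (by name: the statement is the Claim_ definition above) =====
theorem how_many_length_k_spec : Claim_equal_how_many_length_k := by
  intro arr n k _ hpre
  unfold Pre_how_many_length_k at hpre
  unfold Spec_how_many_length_k
  by_cases hk : 1 ≤ k
  · by_cases hn : 1 ≤ n
    · obtain ⟨K, hKe⟩ : ∃ K : Nat, k = (K : Int) := ⟨k.toNat, by omega⟩
      obtain ⟨N, hNe⟩ : ∃ N : Nat, n = (N : Int) := ⟨n.toNat, by omega⟩
      subst hKe; subst hNe
      by_cases hk1 : K = 1
      · -- k == 1: A sums the all-ones row 0, B returns n directly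
        subst hk1
        rw [main_A arr 1 N (by omega) (by omega)]
        have hones : ((List.range N).map (fun t => Erow arr 0 t)) = List.replicate N 1 := by
          have h : ∀ t ∈ List.range N, Erow arr 0 t = (fun _ : Nat => (1 : Int)) t :=
            fun t _ => rfl
          rw [List.map_congr_left h, List.map_const']
          simp
        rw [hones]
        simp [how_many_length_k_alt, show ¬((N : Int) ≤ 0 ∨ (1 : Int) ≤ 0) by omega]
      · by_cases hn1 : N = 1
        · -- n == 1, k ≥ 2: no subsequence of length k fits, both sides are 0
          subst hn1
          rw [main_A arr K 1 (by omega) (by omega)]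
          have h0 : Erow arr (K - 1) 0 = 0 := altEnds_zero arr (K - 1) 0 (by omega)
          simp only [List.range_one, List.map_cons, List.map_nil, List.sum_cons,
            List.sum_nil, h0, add_zero]
          simp [how_many_length_k_alt, show ¬((1 : Int) ≤ 0 ∨ (K : Int) ≤ 0) by omega,
            show ¬ (K : Int) = 1 by exact_mod_cast hk1]
        · -- the main case: k ≥ 2 and n ≥ 2, so Pre_ gives n ≤ len(arr)
          have hlen : N ≤ arr.length := by
            rcases hpre with ⟨h1, _⟩ | ⟨_, h2 | h2 | h2⟩ <;>
              first | omega | (exact_mod_cast (by omega : (N : Int) ≤ (arr.length : Int))) |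
                (exfalso; revert h2; push_cast; omega)
          rw [main_A arr K N (by omega) (by omega),
              main_B arr K N (by omega) (by omega) hlen]
    · exact degenerate_case arr n k (by omega) (by omega)
  · have hnk : n ≤ k - 1 := by rcases hpre with ⟨_, h⟩ | ⟨h1, _⟩ <;> omega
    exact degenerate_case arr n k hnk (by omega)
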